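-- pv_equiv track=rewrite | github.com/edgaytanc/sistema-audita | auditoria/processors/excel/centralizadoras/base.py | preparar_fechas_excel
-- ===== SOURCE A (Python) =====
-- def preparar_fechas_excel(fechas_semestrales):
--     """
--     Prepara las fechas para mostrar en Excel
--
--     Args:
--         fechas_semestrales: Lista con todas las fechas semestrales
--
--     Returns:
--         Tuple con (fechas_año_viejo, fecha_mas_reciente, año_mas_viejo, año_mas_reciente, fechas_excel)
--     """
--     # Ordenar fechas por año
--     fechas_por_año = {}
--     for fecha in fechas_semestrales:
--         año = fecha.split('-')[0]
--         if año not in fechas_por_año: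
--             fechas_por_año[año] = []
--         fechas_por_año[año].append(fecha)
--
--     # Ordenar años
--     años_ordenados = sorted(fechas_por_año.keys())
--
--     if not años_ordenados:
--         return None, None, None, None, None
--
--     # Obtener el año más viejo y el más reciente
--     año_mas_viejo = años_ordenados[0]
--     año_mas_reciente = años_ordenados[-1]
--
--     # Obtener las fechas del año más viejo (ordenadas)
--     fechas_año_viejo = sorted(fechas_por_año[año_mas_viejo])
--
--     # Verificar si tenemos suficientes fechas para el año más viejo
--     while len(fechas_año_viejo) < 3:
--         if fechas_año_viejo:
--             fechas_año_viejo.append(fechas_año_viejo[-1])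
--         else:
--             fechas_año_viejo.append("")
--
--     # Obtener la fecha más reciente del año más reciente
--     fecha_mas_reciente = sorted(fechas_por_año[año_mas_reciente])[-1]
--
--     # Formatear fechas para Excel
--     fechas_excel = {
--         'D12': f"Al 01/01/{año_mas_viejo}",
--         'E12': f"Al 31/07/{año_mas_viejo}",
--         'F12': f"Al 31/12/{año_mas_viejo}",
--         'I12': f"Al 31/12/{año_mas_reciente}"
--     }
--
--     return fechas_año_viejo, fecha_mas_reciente, año_mas_viejo, año_mas_reciente, fechas_excel
-- ===== SOURCE B (Python) =====
-- def preparar_fechas_excel(fechas_semestrales):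
--     """
--     Prepara las fechas para mostrar en Excel
--
--     Args:
--         fechas_semestrales: Lista con todas las fechas semestrales
--
--     Returns:
--         Tuple con (fechas_año_viejo, fecha_mas_reciente, año_mas_viejo, año_mas_reciente, fechas_excel)
--     """
--     years = [f.split('-')[0] for f in fechas_semestrales]
--     if not years:
--         return None, None, None, None, None
--
--     año_mas_viejo = min(years)
--     año_mas_reciente = max(years)
--
--     fechas_año_viejo = sorted(f for f in fechas_semestrales
--                               if f.split('-')[0] == año_mas_viejo)
--     relleno = fechas_año_viejo[-1] if fechas_año_viejo else ""
--     fechas_año_viejo += [relleno] * (3 - len(fechas_año_viejo))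
--
--     fecha_mas_reciente = max(f for f in fechas_semestrales
--                              if f.split('-')[0] == año_mas_reciente)
--
--     fechas_excel = {
--         'D12': f"Al 01/01/{año_mas_viejo}",
--         'E12': f"Al 31/07/{año_mas_viejo}",
--         'F12': f"Al 31/12/{año_mas_viejo}",
--         'I12': f"Al 31/12/{año_mas_reciente}"
--     }
--
--     return fechas_año_viejo, fecha_mas_reciente, año_mas_viejo, año_mas_reciente, fechas_excel
-- ===== Notes on version B (the rewrite author's own statement) =====
-- stated objective: simpler
-- what changed: Drops the year-grouping dict and its sorted-keys pass entirely: B takes min/max over the per-date year strings, selects the relevant dates by two direct filters, and replaces the while-padding loop with a single replicate-extend.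
import Mathlib
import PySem

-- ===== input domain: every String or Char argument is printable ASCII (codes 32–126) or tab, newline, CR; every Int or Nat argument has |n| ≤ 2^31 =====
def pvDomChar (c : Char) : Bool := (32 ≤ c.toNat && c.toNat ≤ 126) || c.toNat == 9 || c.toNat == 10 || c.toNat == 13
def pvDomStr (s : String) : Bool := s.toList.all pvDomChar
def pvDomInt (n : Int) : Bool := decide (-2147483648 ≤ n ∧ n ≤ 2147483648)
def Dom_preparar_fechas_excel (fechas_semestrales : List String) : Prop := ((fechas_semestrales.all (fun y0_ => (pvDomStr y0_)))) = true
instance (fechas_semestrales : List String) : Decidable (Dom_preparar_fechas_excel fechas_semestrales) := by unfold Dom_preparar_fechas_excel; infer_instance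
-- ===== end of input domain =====

-- B drops A's year-grouping dict and sorted-keys pass: min/max over the year strings plus two
-- direct filters, and a replicate-extend instead of A's while-padding loop (objective: simpler).

-- fecha.split('-')[0]  (split? is some since "-" ≠ ""; the list is always nonempty, so [0] is safe)
def yearOf (fecha : String) : String :=
  PySem.List.pyGetD ((PySem.Str.split? fecha "-").getD []) 0 ""

-- ===== PORT A =====
-- body of A's grouping loop: if año not in d: d[año] = []; d[año].append(fecha)
def pvGroupStep (d : PySem.Dict String (List String)) (fecha : String) :
    PySem.Dict String (List String) :=
  let año := yearOf fecha
  let d' := if d.contains año then d else d.insert año []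
  d'.modify año [] (fun l => l ++ [fecha])

-- A's while-loop: pad to length 3 with "" (if empty) or the last element
def pvPad3 (l : List String) : List String :=
  if _h : l.length < 3 then
    if he : l = [] then pvPad3 (l ++ [""]) else pvPad3 (l ++ [l.getLast he])
  else l
termination_by 3 - l.length
decreasing_by all_goals simp [List.length_append]; omega

def preparar_fechas_excel (fechas_semestrales : List String) :
    Option (List String) × Option String × Option String × Option String × (Option (List (String × String))) :=
  let fechas_por_año := fechas_semestrales.foldl pvGroupStep PySem.Dict.empty
  let años_ordenados := PySem.List.sorted fechas_por_año.keys (fun x => x) false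
  if h : años_ordenados = [] then (none, none, none, none, none)
  else
    let año_mas_viejo := años_ordenados.head h
    let año_mas_reciente := años_ordenados.getLast h
    let fechas_año_viejo :=
      pvPad3 (PySem.List.sorted (fechas_por_año.getD año_mas_viejo []) (fun x => x) false)
    -- sorted(...)[-1]; the group of a key is nonempty, so the default is never taken
    let fecha_mas_reciente :=
      PySem.List.pyGetD (PySem.List.sorted (fechas_por_año.getD año_mas_reciente []) (fun x => x) false) (-1) ""
    (some fechas_año_viejo, some fecha_mas_reciente, some año_mas_viejo, some año_mas_reciente,
      some [("D12", "Al 01/01/" ++ año_mas_viejo), ("E12", "Al 31/07/" ++ año_mas_viejo),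
            ("F12", "Al 31/12/" ++ año_mas_viejo), ("I12", "Al 31/12/" ++ año_mas_reciente)])

-- ===== PORT B =====
def preparar_fechas_excel_alt (fechas_semestrales : List String) :
    Option (List String) × Option String × Option String × Option String × (Option (List (String × String))) :=
  let years := fechas_semestrales.map yearOf
  if years = [] then (none, none, none, none, none)
  else
    let año_mas_viejo := (PySem.List.min? years (fun x => x)).getD ""
    let año_mas_reciente := (PySem.List.max? years (fun x => x)).getD ""
    let fechas0 :=
      PySem.List.sorted (fechas_semestrales.filter (fun f => yearOf f == año_mas_viejo)) (fun x => x) false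
    let relleno := if he : fechas0 = [] then "" else fechas0.getLast he
    let fechas_año_viejo := fechas0 ++ List.replicate (3 - fechas0.length) relleno
    -- max(...) over a nonempty filter; the default is never taken
    let fecha_mas_reciente :=
      (PySem.List.max? (fechas_semestrales.filter (fun f => yearOf f == año_mas_reciente)) (fun x => x)).getD ""
    (some fechas_año_viejo, some fecha_mas_reciente, some año_mas_viejo, some año_mas_reciente,
      some [("D12", "Al 01/01/" ++ año_mas_viejo), ("E12", "Al 31/07/" ++ año_mas_viejo),
            ("F12", "Al 31/12/" ++ año_mas_viejo), ("I12", "Al 31/12/" ++ año_mas_reciente)])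

-- ===== PRECONDITION & SPEC =====
def Spec_preparar_fechas_excel (fechas_semestrales : List String) (out : Option (List String) × Option String × Option String × Option String × (Option (List (String × String)))) : Prop := out = preparar_fechas_excel_alt fechas_semestrales
instance (fechas_semestrales : List String) (out : Option (List String) × Option String × Option String × Option String × (Option (List (String × String)))) : Decidable (Spec_preparar_fechas_excel fechas_semestrales out) := by
  unfold Spec_preparar_fechas_excel
  exact @instDecidableEqProd _ _ _
    (fun x y => @instDecidableEqProd _ _ _
      (fun u v => @instDecidableEqProd _ _ _
        (fun p q => @instDecidableEqProd _ _ _ _ p q) u v) x y) out _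

-- ===== CLAIM (what is proved, stated in full; the proofs are below) =====
def Claim_equal_preparar_fechas_excel : Prop := ∀ (fechas_semestrales : List String), Dom_preparar_fechas_excel fechas_semestrales → Spec_preparar_fechas_excel fechas_semestrales (preparar_fechas_excel fechas_semestrales)

-- ===== LEMMAS AND PROOFS =====

-- one grouping step, seen through getD
theorem getD_pvGroupStep (d : PySem.Dict String (List String)) (f : String) (c : String) :
    (pvGroupStep d f).getD c [] =
      if c = yearOf f then d.getD c [] ++ [f] else d.getD c [] := by
  unfold pvGroupStep
  by_cases hc : d.contains (yearOf f)
  · simp only [hc, if_true]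
    rw [PySem.Dict.getD_modify]
    split_ifs with h
    · subst h; rfl
    · rfl
  · simp only [hc, Bool.false_eq_true, if_false]
    rw [PySem.Dict.getD_modify]
    split_ifs with h
    · subst h
      rw [PySem.Dict.getD_insert]
      simp [PySem.Dict.getD_of_not_contains d [] (by simpa using hc)]
    · rw [PySem.Dict.getD_insert]
      simp [h]
  -- hc lives in Bool: contains = true / false handled above

-- the grouping dict's entry at c is exactly the filter of the input on year c
theorem getD_foldl_pvGroupStep (l : List String) (d : PySem.Dict String (List String)) (c : String) :
    (l.foldl pvGroupStep d).getD c [] = d.getD c [] ++ l.filter (fun f => yearOf f == c) := by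
  induction l generalizing d with
  | nil => simp
  | cons f t ih =>
    simp only [List.foldl_cons, ih, getD_pvGroupStep, List.filter_cons]
    by_cases h : c = yearOf f
    · simp [h]
    · have : (yearOf f == c) = false := by simp; exact fun e => h e.symm
      simp [h, this]

-- one grouping step, seen through keys membership
theorem mem_keys_pvGroupStep (d : PySem.Dict String (List String)) (f y : String) :
    y ∈ (pvGroupStep d f).keys ↔ y = yearOf f ∨ y ∈ d.keys := by
  unfold pvGroupStep
  rw [PySem.Dict.keys_modify]
  by_cases hc : d.contains (yearOf f)
  · simp only [hc, if_true]
    exact PySem.Dict.mem_keys_insert _ _ _ _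
  · simp only [hc, Bool.false_eq_true, if_false]
    rw [PySem.Dict.keys_insert_of_contains _ _ (PySem.Dict.contains_insert_self d (yearOf f) [])]
    rw [PySem.Dict.keys_insert_of_not_contains _ _ (by simpa using hc)]
    simp [or_comm]

-- membership in the grouping dict's keys = membership among the years
theorem mem_keys_foldl_pvGroupStep (l : List String) (d : PySem.Dict String (List String)) (y : String) :
    y ∈ (l.foldl pvGroupStep d).keys ↔ y ∈ d.keys ∨ y ∈ l.map yearOf := by
  induction l generalizing d with
  | nil => simp
  | cons f t ih =>
    simp only [List.foldl_cons, ih, mem_keys_pvGroupStep, List.map_cons, List.mem_cons]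
    tauto

-- a ≤-pairwise list is bounded by its last element
theorem le_getLast_of_pairwise (l : List String) (h : l.Pairwise (· ≤ ·)) (hne : l ≠ []) :
    ∀ x ∈ l, x ≤ l.getLast hne := by
  induction l with
  | nil => simp
  | cons a t ih =>
    intro x hx
    rcases List.mem_cons.1 hx with rfl | hx
    · cases t with
      | nil => simp
      | cons b u =>
        have hxb : x ≤ b := (List.pairwise_cons.1 h).1 b (by simp)
        exact le_trans hxb (ih (List.pairwise_cons.1 h).2 (by simp) b (by simp))
    · cases t with
      | nil => simp at hx
      | cons b u =>
        rw [List.getLast_cons (by simp)]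
        exact ih (List.pairwise_cons.1 h).2 (by simp) x hx

-- sorted(xs)[-1] = max(xs) for nonempty xs of strings
theorem getLast_sorted_eq_max (xs : List String) (hne : xs ≠ [])
    (h : PySem.List.sorted xs (fun x => x) false ≠ []) :
    (PySem.List.sorted xs (fun x => x) false).getLast h =
      (PySem.List.max? xs (fun x => x)).getD "" := by
  obtain ⟨m, hm⟩ : ∃ m, PySem.List.max? xs (fun x => x) = some m := by
    cases hmx : PySem.List.max? xs (fun x => x) with
    | none => exact absurd ((PySem.List.max?_eq_none_iff xs _).1 hmx) hne
    | some m => exact ⟨m, rfl⟩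
  rw [hm]
  have hlast_mem : (PySem.List.sorted xs (fun x => x) false).getLast h ∈ xs :=
    (PySem.List.mem_sorted xs _ false _).1 (List.getLast_mem h)
  have h1 : (PySem.List.sorted xs (fun x => x) false).getLast h ≤ m :=
    PySem.List.max?_isMax hm _ hlast_mem
  have h2 : m ≤ (PySem.List.sorted xs (fun x => x) false).getLast h :=
    le_getLast_of_pairwise _ (PySem.List.sorted_pairwise xs (fun x => x)) h m
      ((PySem.List.mem_sorted xs _ false m).2 (PySem.List.max?_mem hm))
  exact le_antisymm h1 h2

-- head of the sorted key list = min of the (duplicated) year list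
theorem head_sorted_keys_eq_min (keys years : List String)
    (hmem : ∀ y, y ∈ keys ↔ y ∈ years)
    (h : PySem.List.sorted keys (fun x => x) false ≠ []) :
    (PySem.List.sorted keys (fun x => x) false).head h =
      (PySem.List.min? years (fun x => x)).getD "" := by
  have hyne : years ≠ [] := by
    intro he
    exact h ((PySem.List.sorted_eq_nil_iff keys _ false).2
      (List.eq_nil_iff_forall_not_mem.2 (fun y hy => by
        have := (hmem y).1 hy; simp [he] at this)))
  obtain ⟨m, hm⟩ : ∃ m, PySem.List.min? years (fun x => x) = some m := by
    cases hmx : PySem.List.min? years (fun x => x) with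
    | none => exact absurd ((PySem.List.min?_eq_none_iff years _).1 hmx) hyne
    | some m => exact ⟨m, rfl⟩
  rw [hm]
  have hcons : PySem.List.sorted keys (fun x => x) false =
      (PySem.List.sorted keys (fun x => x) false).head h ::
      (PySem.List.sorted keys (fun x => x) false).tail := (List.cons_head_tail h).symm
  have hmin : ∀ y ∈ keys, (PySem.List.sorted keys (fun x => x) false).head h ≤ y :=
    PySem.List.key_head_sorted_le keys (fun x => x) hcons
  have hhead_mem : (PySem.List.sorted keys (fun x => x) false).head h ∈ years :=
    (hmem _).1 ((PySem.List.mem_sorted keys _ false _).1 (List.head_mem h))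
  have hm_mem : m ∈ keys := (hmem m).2 (PySem.List.min?_mem hm)
  exact le_antisymm (hmin m hm_mem) (PySem.List.min?_isMin hm _ hhead_mem)

-- last of the sorted key list = max of the (duplicated) year list
theorem getLast_sorted_keys_eq_max (keys years : List String)
    (hmem : ∀ y, y ∈ keys ↔ y ∈ years)
    (h : PySem.List.sorted keys (fun x => x) false ≠ []) :
    (PySem.List.sorted keys (fun x => x) false).getLast h =
      (PySem.List.max? years (fun x => x)).getD "" := by
  have hyne : years ≠ [] := by
    intro he
    exact h ((PySem.List.sorted_eq_nil_iff keys _ false).2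
      (List.eq_nil_iff_forall_not_mem.2 (fun y hy => by
        have := (hmem y).1 hy; simp [he] at this)))
  obtain ⟨m, hm⟩ : ∃ m, PySem.List.max? years (fun x => x) = some m := by
    cases hmx : PySem.List.max? years (fun x => x) with
    | none => exact absurd ((PySem.List.max?_eq_none_iff years _).1 hmx) hyne
    | some m => exact ⟨m, rfl⟩
  rw [hm]
  have hle : ∀ x ∈ PySem.List.sorted keys (fun x => x) false,
      x ≤ (PySem.List.sorted keys (fun x => x) false).getLast h :=
    le_getLast_of_pairwise _ (PySem.List.sorted_pairwise keys (fun x => x)) h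
  have h1 : (PySem.List.sorted keys (fun x => x) false).getLast h ≤ m :=
    PySem.List.max?_isMax hm _ ((hmem _).1
      ((PySem.List.mem_sorted keys _ false _).1 (List.getLast_mem h)))
  have h2 : m ≤ (PySem.List.sorted keys (fun x => x) false).getLast h :=
    hle m ((PySem.List.mem_sorted keys _ false m).2 ((hmem m).2 (PySem.List.max?_mem hm)))
  exact le_antisymm h1 h2

-- the padding loop = replicate-extend, for nonempty input
theorem pvPad3_eq (l : List String) (hne : l ≠ []) :
    pvPad3 l = l ++ List.replicate (3 - l.length) (l.getLast hne) := by
  match l with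
  | [a] =>
    rw [pvPad3, dif_pos (by simp), dif_neg (by simp)]
    rw [show ([a] ++ [[a].getLast (by simp)]) = [a, a] by simp]
    rw [pvPad3, dif_pos (by simp), dif_neg (by simp)]
    rw [show ([a, a] ++ [[a, a].getLast (by simp)]) = [a, a, a] by simp]
    rw [pvPad3, dif_neg (by simp)]
    simp
  | [a, b] =>
    rw [pvPad3, dif_pos (by simp), dif_neg (by simp)]
    rw [show ([a, b] ++ [[a, b].getLast (by simp)]) = [a, b, b] by simp]
    rw [pvPad3, dif_neg (by simp)]
    simp
  | a :: b :: c :: t =>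
    rw [pvPad3, dif_neg (by simp)]
    have h0 : 3 - (a :: b :: c :: t).length = 0 := by simp
    rw [h0]
    simp

-- the defaulted negative-one index is the getLast, stated for rewriting
theorem pyGetD_neg_one' (xs : List String) (h : xs ≠ []) :
    PySem.List.pyGetD xs (-1) "" = xs.getLast h := PySem.List.pyGetD_neg_one xs "" h

-- ===== VERDICT (by name: the statement is the Claim_ definition above) =====
theorem preparar_fechas_excel_spec : Claim_equal_preparar_fechas_excel := by
  intro fechas _
  unfold Spec_preparar_fechas_excel preparar_fechas_excel preparar_fechas_excel_alt
  set d := fechas.foldl pvGroupStep PySem.Dict.empty with hd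
  set años := PySem.List.sorted d.keys (fun x => x) false with haños
  have hmem : ∀ y, y ∈ d.keys ↔ y ∈ fechas.map yearOf := by
    intro y
    rw [hd, mem_keys_foldl_pvGroupStep]
    simp [PySem.Dict.keys_empty]
  have hgetD : ∀ c, d.getD c [] = fechas.filter (fun f => yearOf f == c) := by
    intro c
    rw [hd, getD_foldl_pvGroupStep]
    simp [PySem.Dict.getD_empty]
  by_cases h : años = []
  · -- empty input on both sides
    have hfe : fechas = [] := by
      have hk : d.keys = [] := (PySem.List.sorted_eq_nil_iff _ _ _).1 h
      cases fechas with
      | nil => rfl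
      | cons f t =>
        exfalso
        have : yearOf f ∈ d.keys := (hmem _).2 (by simp)
        simp [hk] at this
    subst hfe
    rw [dif_pos h]
    simp
  · rw [dif_neg h]
    have hyne : fechas.map yearOf ≠ [] := by
      intro he
      exact h ((PySem.List.sorted_eq_nil_iff _ _ _).2
        (List.eq_nil_iff_forall_not_mem.2 (fun y hy => by
          have := (hmem y).1 hy; simp [he] at this)))
    rw [if_neg hyne]
    -- identify the two year selections
    have hy0 : años.head h = (PySem.List.min? (fechas.map yearOf) (fun x => x)).getD "" :=
      head_sorted_keys_eq_min d.keys (fechas.map yearOf) hmem h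
    have hy1 : años.getLast h = (PySem.List.max? (fechas.map yearOf) (fun x => x)).getD "" :=
      getLast_sorted_keys_eq_max d.keys (fechas.map yearOf) hmem h
    -- the old-year group, sorted, is nonempty
    have hy0mem : años.head h ∈ fechas.map yearOf :=
      (hmem _).1 ((PySem.List.mem_sorted _ _ _ _).1 (List.head_mem h))
    obtain ⟨f0, hf0mem, hf0⟩ := List.mem_map.1 hy0mem
    have hfil0 : fechas.filter (fun f => yearOf f == años.head h) ≠ [] := by
      intro he
      have : f0 ∈ fechas.filter (fun f => yearOf f == años.head h) :=
        List.mem_filter.2 ⟨hf0mem, by simp [hf0]⟩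
      simp [he] at this
    have hs0 : PySem.List.sorted (fechas.filter (fun f => yearOf f == años.head h)) (fun x => x) false ≠ [] :=
      fun he => hfil0 ((PySem.List.sorted_eq_nil_iff _ _ _).1 he)
    -- the recent-year group is nonempty
    have hy1mem : años.getLast h ∈ fechas.map yearOf :=
      (hmem _).1 ((PySem.List.mem_sorted _ _ _ _).1 (List.getLast_mem h))
    obtain ⟨f1, hf1mem, hf1⟩ := List.mem_map.1 hy1mem
    have hfil1 : fechas.filter (fun f => yearOf f == años.getLast h) ≠ [] := by
      intro he
      have : f1 ∈ fechas.filter (fun f => yearOf f == años.getLast h) :=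
        List.mem_filter.2 ⟨hf1mem, by simp [hf1]⟩
      simp [he] at this
    refine Prod.ext ?_ (Prod.ext ?_ (Prod.ext ?_ (Prod.ext ?_ ?_))) <;>
      simp only [← hy0, ← hy1, hgetD]
    · -- fechas_año_viejo
      rw [pvPad3_eq _ hs0]
      congr 1
      rw [dif_neg hs0]
    · -- fecha_mas_reciente
      rw [pyGetD_neg_one' _ (by
        intro he
        exact hfil1 ((PySem.List.sorted_eq_nil_iff _ _ _).1 he))]
      exact congrArg some (getLast_sorted_eq_max _ hfil1 _)
    · rfl
    · rfl
    · rfl
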